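-- pv_equiv track=rewrite | github.com/brianolson/redistricter | tabledesc/sasdesc.py | countws
-- ===== SOURCE A (Python) =====
-- def countws(s):
-- 	count = 0
-- 	for c in s:
-- 		if c == ' ':
-- 			count += 1
-- 		elif c == '\t':
-- 			count += 8
-- 		else:
-- 			return count
-- ===== SOURCE B (Python) =====
-- def countws(s):
-- 	idx = next((i for i, c in enumerate(s) if c not in ' \t'), None)
-- 	if idx is None:
-- 		return None
-- 	prefix = s[:idx]
-- 	return prefix.count(' ') + 8 * prefix.count('\t')
-- ===== Notes on version B (the rewrite author's own statement) =====
-- stated objective: simpler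
-- what changed: B finds the boundary of the leading whitespace first and then tallies the prefix with two count() calls, instead of A's fused scan with a running weighted accumulator; Pre_ excludes strings whose characters are all spaces/tabs (including the empty string), where A falls off the loop and returns None rather than an int.
-- outside the precondition, e.g. on countws(''): A returns None, B returns None; on countws(' \t'): A returns None, B returns None
import Mathlib
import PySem

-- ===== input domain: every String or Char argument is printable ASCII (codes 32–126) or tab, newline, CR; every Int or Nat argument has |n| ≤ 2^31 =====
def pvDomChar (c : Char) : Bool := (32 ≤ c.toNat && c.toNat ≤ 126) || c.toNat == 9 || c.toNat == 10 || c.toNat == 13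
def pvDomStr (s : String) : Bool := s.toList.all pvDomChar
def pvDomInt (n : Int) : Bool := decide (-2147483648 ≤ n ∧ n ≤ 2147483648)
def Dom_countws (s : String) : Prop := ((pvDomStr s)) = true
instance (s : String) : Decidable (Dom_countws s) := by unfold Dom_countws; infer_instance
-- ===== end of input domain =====

-- B finds the whitespace boundary first, then tallies the prefix with two counts (simpler decomposition; Pre_ excludes all-whitespace strings where A returns None, not an int).


-- ===== PORT A =====
-- the for-loop of A: running accumulator, early return on the first non-space/tab char
def countwsLoop : List Char → Int → Int
  | [], count => count  -- Python falls off the loop and returns None here; excluded by Pre_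
  | c :: cs, count =>
    if c = ' ' then countwsLoop cs (count + 1)
    else if c = '\t' then countwsLoop cs (count + 8)
    else count

def countws (s : String) : Int := countwsLoop s.toList 0

-- ===== PORT B =====
def pvNonWs (c : Char) : Bool := !(c == ' ' || c == '\t')

def countws_alt (s : String) : Int :=
  match s.toList.findIdx? pvNonWs with
  | none => 0  -- Source B returns None here; excluded by Pre_
  | some i =>
    let pre := s.toList.take i
    (pre.count ' ' : Int) + 8 * (pre.count '\t' : Int)

-- ===== PRECONDITION & SPEC =====
-- Pre_ excludes strings consisting entirely of spaces/tabs (including ""), on which A falls off the loop and returns None, which is not an int.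
def Pre_countws (s : String) : Prop := (s.toList.any pvNonWs) = true
instance (s : String) : Decidable (Pre_countws s) := by unfold Pre_countws; infer_instance
def pvWitness_countws : String := "  \tab"

def Spec_countws (s : String) (out : Int) : Prop := out = countws_alt s
instance (s : String) (out : Int) : Decidable (Spec_countws s out) := by unfold Spec_countws; infer_instance

-- ===== CLAIM =====
def Claim_equal_countws : Prop := ∀ (s : String), Dom_countws s → Pre_countws s → Spec_countws s (countws s)

-- ===== LEMMAS AND PROOFS =====
def altOf (l : List Char) : Int :=
  match l.findIdx? pvNonWs with
  | none => 0
  | some i => ((l.take i).count ' ' : Int) + 8 * ((l.take i).count '\t' : Int)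

theorem countwsLoop_eq (l : List Char) : ∀ (count : Int),
    l.any pvNonWs = true → countwsLoop l count = count + altOf l := by
  induction l with
  | nil => intro count h; simp at h
  | cons c cs ih =>
    intro count h
    by_cases hc : pvNonWs c = true
    · have hc' : ¬ c = ' ' ∧ ¬ c = '\t' := by
        simp [pvNonWs] at hc; exact hc
      simp [countwsLoop, hc'.1, hc'.2, altOf, List.findIdx?_cons, hc]
    · have hws : c = ' ' ∨ c = '\t' := by
        simp [pvNonWs] at hc
        tauto
      have hcs : cs.any pvNonWs = true := by
        simp [List.any_cons, hc] at h
        simpa using h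
      obtain ⟨i, hi⟩ : ∃ i, cs.findIdx? pvNonWs = some i := by
        cases hfi : cs.findIdx? pvNonWs with
        | some i => exact ⟨i, rfl⟩
        | none =>
          exfalso
          rcases List.any_eq_true.mp hcs with ⟨x, hx, hpx⟩
          have := List.findIdx?_eq_none_iff.mp hfi x hx
          simp [hpx] at this
      rcases hws with h1 | h1 <;>
      · subst h1
        rw [countwsLoop]
        simp only [reduceIte, Char.reduceEq]
        rw [ih _ hcs]
        simp [altOf, List.findIdx?_cons, hc, hi]
        ring

-- ===== VERDICT =====
theorem countws_spec : Claim_equal_countws := by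
  intro s _ hpre
  unfold Spec_countws countws countws_alt
  rw [countwsLoop_eq _ _ hpre]
  simp [altOf]
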